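-- pv_equiv track=rewrite | github.com/liujigang82/ContainerNum | testFunc.py | str_confidence
-- ===== SOURCE A (Python) =====
-- def str_confidence(str):
--     str_list = str.split(" ")
--     numbers = 0
--     words = 0
--     for item in str_list:
--         if len(item) == 4 and item[len(item)-1].lower() == "u":
--             return 0
--         numbers = sum(c.isdigit() for c in item) if sum(c.isdigit() for c in item)>numbers else numbers
--         words = sum(c.isalpha() for c in item) if sum(c.isalpha() for c in item) > words else words
--     #numbers = sum(c.isdigit() for c in str)
--     #words = sum(c.isalpha() for c in str)
--     #spaces = sum(c.isspace() for c in str)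
--     return abs(4-words) + abs(7-numbers)
-- ===== SOURCE B (Python) =====
-- def str_confidence(str):
--     # One streaming pass over the characters: no split(), no per-word inner sums.
--     best_d = best_a = d = a = n = 0
--     last = ""
--     hit = False
--     for c in str + " ":
--         if c == " ":
--             if n == 4 and last.lower() == "u":
--                 hit = True
--             if d > best_d:
--                 best_d = d
--             if a > best_a:
--                 best_a = a
--             d = a = n = 0
--             last = ""
--         else:
--             n += 1
--             last = c
--             if c.isdigit():
--                 d += 1
--             if c.isalpha():
--                 a += 1
--     return 0 if hit else abs(4 - best_a) + abs(7 - best_d)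
-- ===== Notes on version B (the rewrite author's own statement) =====
-- stated objective: alternative
-- what changed: Replaces A's split-into-words loop with inner per-word digit/alpha sums by a single streaming character scan that never splits the string: it carries running word state (length, digit/alpha counts, last char) and flushes it at each space and at the end.
import Mathlib
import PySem

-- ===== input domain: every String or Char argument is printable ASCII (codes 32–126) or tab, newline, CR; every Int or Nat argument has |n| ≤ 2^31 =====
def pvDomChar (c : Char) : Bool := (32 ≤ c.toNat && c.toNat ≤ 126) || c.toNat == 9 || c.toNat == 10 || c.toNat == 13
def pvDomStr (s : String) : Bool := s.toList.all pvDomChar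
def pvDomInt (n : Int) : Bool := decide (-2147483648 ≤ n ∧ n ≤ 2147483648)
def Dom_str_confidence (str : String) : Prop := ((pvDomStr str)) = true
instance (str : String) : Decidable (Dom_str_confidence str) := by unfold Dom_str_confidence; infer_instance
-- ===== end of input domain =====

-- B replaces A's split-into-words loop (with inner per-word sums) by one streaming
-- character scan carrying running word state, flushed at spaces (objective: alternative).

-- ===== PORT A =====
-- A's for-loop over str.split(" ") with its early `return 0`, as structural recursion
-- over the word list carrying the two running maxima `numbers` and `words`.
def pvALoop : List (List Char) → Int → Int → Int
  | [], numbers, words => |4 - words| + |7 - numbers|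
  | item :: rest, numbers, words =>
    if item.length == 4 &&
        ((PySem.List.pyGet? item ((item.length : Int) - 1)).map PySem.Chars.lowerChar == some 'u')
    then 0
    else
      let nd := (item.map (fun c => if PySem.Chars.isdigit c then (1 : Int) else 0)).sum
      let wd := (item.map (fun c => if PySem.Chars.isalpha c then (1 : Int) else 0)).sum
      pvALoop rest (if nd > numbers then nd else numbers) (if wd > words then wd else words)

def str_confidence (str : String) : Int :=
  pvALoop (PySem.Chars.splitOn str.toList [' ']) 0 0

-- ===== PORT B =====
-- The scan state: running maxima, current word's digit/alpha counts and length,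
-- its last character so far (Python's `last`, "" ↦ none), and the guard flag.
structure PvBSt where
  bestD : Int
  bestA : Int
  d : Int
  a : Int
  n : Int
  last : Option Char
  hit : Bool
deriving DecidableEq, Repr

def pvBStep (s : PvBSt) (c : Char) : PvBSt :=
  if c = ' ' then
    { bestD := if s.d > s.bestD then s.d else s.bestD
      bestA := if s.a > s.bestA then s.a else s.bestA
      d := 0, a := 0, n := 0, last := none
      hit := if s.n == 4 && (s.last.map PySem.Chars.lowerChar == some 'u') then true else s.hit }
  else
    { s with
      n := s.n + 1
      last := some c
      d := if PySem.Chars.isdigit c then s.d + 1 else s.d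
      a := if PySem.Chars.isalpha c then s.a + 1 else s.a }

def str_confidence_alt (str : String) : Int :=
  let s := (str.toList ++ [' ']).foldl pvBStep
    { bestD := 0, bestA := 0, d := 0, a := 0, n := 0, last := none, hit := false }
  if s.hit then 0 else |4 - s.bestA| + |7 - s.bestD|

-- ===== PRECONDITION & SPEC =====
def Spec_str_confidence (str : String) (out : Int) : Prop := out = str_confidence_alt str
instance (str : String) (out : Int) : Decidable (Spec_str_confidence str out) := by unfold Spec_str_confidence; infer_instance

-- ===== CLAIM (what is proved, stated in full; the proofs are below) =====
def Claim_equal_str_confidence : Prop := ∀ (str : String), Dom_str_confidence str → Spec_str_confidence str (str_confidence str)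

-- ===== LEMMAS AND PROOFS =====

-- A simple recursive characterisation of split(" "): `pvSplit pre s` splits s at
-- spaces, with pre prepended to the first word.
def pvSplit (pre : List Char) : List Char → List (List Char)
  | [] => [pre]
  | c :: rest => if c = ' ' then pre :: pvSplit [] rest else pvSplit (pre ++ [c]) rest

lemma pvGo_eq : ∀ (fuel : Nat) (l cur : List Char) (acc : List (List Char)),
    l.length ≤ fuel →
    PySem.Chars.splitOn.go [' '] fuel l cur acc = acc.reverse ++ pvSplit cur.reverse l := by
  intro fuel
  induction fuel with
  | zero =>
    intro l cur acc h
    have : l = [] := List.eq_nil_of_length_eq_zero (Nat.le_zero.mp h)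
    subst this
    simp [PySem.Chars.splitOn.go, pvSplit]
  | succ fuel ih =>
    intro l cur acc h
    cases l with
    | nil => simp [PySem.Chars.splitOn.go, pvSplit]
    | cons c rest =>
      rw [PySem.Chars.splitOn.go]
      by_cases hc : c = ' '
      · subst hc
        have hp : [' '].isPrefixOf (' ' :: rest) = true := by simp [List.isPrefixOf]
        simp only [hp, if_true, List.length_cons, List.length_nil, List.drop_succ_cons, List.drop_zero]
        rw [ih rest [] (cur.reverse :: acc) (by simpa using Nat.le_of_succ_le_succ h)]
        simp [pvSplit]
      · have hp : [' '].isPrefixOf (c :: rest) = false := by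
          simp only [List.isPrefixOf, Bool.and_true, beq_eq_false_iff_ne, ne_eq]
          exact Ne.symm hc
        simp only [hp, Bool.false_eq_true, if_false]
        rw [ih rest (c :: cur) acc (by simpa using Nat.le_of_succ_le_succ h)]
        simp [pvSplit, hc]

lemma pvSplitOn_eq (s : List Char) : PySem.Chars.splitOn s [' '] = pvSplit [] s := by
  unfold PySem.Chars.splitOn
  rw [pvGo_eq (s.length + 1) s [] [] (by omega)]
  simp

-- A's guard on a word equals B's guard computed from the word's length and last char.
lemma pvGuard_eq (w : List Char) :
    (w.length == 4 &&
      ((PySem.List.pyGet? w ((w.length : Int) - 1)).map PySem.Chars.lowerChar == some 'u'))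
      = (((w.length : Int)) == 4 && (w.getLast?.map PySem.Chars.lowerChar == some 'u')) := by
  by_cases h : w.length = 4
  · have h1 : ((w.length : Int) - 1) = ((3 : Nat) : Int) := by omega
    rw [h1, PySem.List.pyGet?_natCast]
    have h2 : w.getLast? = w[3]? := by
      rw [List.getLast?_eq_getElem?, h]
    simp [h, h2]
  · have hf : (w.length == 4) = false := by simpa using h
    have hf2 : (((w.length : Int)) == 4) = false := by
      simp only [beq_eq_false_iff_ne, ne_eq]
      omega
    simp [hf, hf2]

-- Current-word invariants packaged: the state after scanning `pre` as the open word.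
def pvMkSt (bd ba : Int) (h : Bool) (pre : List Char) : PvBSt :=
  { bestD := bd, bestA := ba
    d := (pre.map (fun c => if PySem.Chars.isdigit c then (1 : Int) else 0)).sum
    a := (pre.map (fun c => if PySem.Chars.isalpha c then (1 : Int) else 0)).sum
    n := (pre.length : Int)
    last := pre.getLast?
    hit := h }

-- The finalisation A and B both apply at the end.
def pvFin (t : PvBSt) : Int := if t.hit then 0 else |4 - t.bestA| + |7 - t.bestD|

-- The heart of the proof: scanning the rest of the string (plus the final flush space)
-- from an open-word state computes A's word loop on `pvSplit pre`.
lemma pvScan_eq (s : List Char) : ∀ (pre : List Char) (bd ba : Int) (h : Bool),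
    pvFin ((s ++ [' ']).foldl pvBStep (pvMkSt bd ba h pre))
      = if h then 0 else pvALoop (pvSplit pre s) bd ba := by
  induction s with
  | nil =>
    intro pre bd ba h
    simp only [List.nil_append, List.foldl_cons, List.foldl_nil, pvSplit]
    rw [pvBStep]
    simp only [reduceIte]
    rw [pvALoop, pvGuard_eq]
    by_cases hg : (((pre.length : Int)) == 4 && (pre.getLast?.map PySem.Chars.lowerChar == some 'u')) = true
    · cases h <;> simp [pvMkSt, pvFin, hg]
    · simp only [Bool.not_eq_true] at hg
      cases h <;> simp [pvMkSt, pvFin, hg, pvALoop]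
  | cons c rest ih =>
    intro pre bd ba h
    simp only [List.cons_append, List.foldl_cons]
    by_cases hc : c = ' '
    · subst hc
      have hstep : pvBStep (pvMkSt bd ba h pre) ' '
          = pvMkSt (if (pvMkSt bd ba h pre).d > bd then (pvMkSt bd ba h pre).d else bd)
                   (if (pvMkSt bd ba h pre).a > ba then (pvMkSt bd ba h pre).a else ba)
                   (if (((pre.length : Int)) == 4 && (pre.getLast?.map PySem.Chars.lowerChar == some 'u')) then true else h)
                   [] := by
        rw [pvBStep]
        simp [pvMkSt]
      rw [hstep, ih]
      simp only [pvSplit, reduceIte]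
      rw [pvALoop, pvGuard_eq]
      by_cases hg : (((pre.length : Int)) == 4 && (pre.getLast?.map PySem.Chars.lowerChar == some 'u')) = true
      · cases h <;> simp [hg]
      · simp only [Bool.not_eq_true] at hg
        cases h <;> simp [hg, pvMkSt]
    · have hstep : pvBStep (pvMkSt bd ba h pre) c = pvMkSt bd ba h (pre ++ [c]) := by
        rw [pvBStep]
        simp only [if_neg hc]
        simp [pvMkSt, List.getLast?_append]
        constructor <;> split <;> ring
      rw [hstep, ih]
      simp [pvSplit, hc]

-- ===== VERDICT (by name: the statement is the Claim_ definition above) =====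
theorem str_confidence_spec : Claim_equal_str_confidence := by
  intro str _
  unfold Spec_str_confidence str_confidence str_confidence_alt
  rw [pvSplitOn_eq]
  have hinit : ({ bestD := 0, bestA := 0, d := 0, a := 0, n := 0, last := none, hit := false } : PvBSt)
      = pvMkSt 0 0 false [] := by simp [pvMkSt]
  rw [hinit]
  have := pvScan_eq str.toList [] 0 0 false
  simp only [Bool.false_eq_true, if_false] at this
  exact this.symm
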